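-- pv_equiv track=rewrite | github.com/ValeGian/FederatedDBSCAN | FederatedDBSCAN/server.py | get_all_neighbor
-- ===== SOURCE A (Python) =====
-- def get_all_neighbor(cell):
--     diag_coord = [(x - 1, x, x + 1) for x in cell]
--
--     cartesian_product = [[]]
--     for pool in diag_coord:
--         cartesian_product = [(x + [y]) for x in cartesian_product for y in pool]
--
--     result = []
--     for prod in cartesian_product:
--         result.append(tuple(prod))
--
--     result.remove(cell)
--     return result
-- ===== SOURCE B (Python) =====
-- def get_all_neighbor(cell):
--     n = len(cell)
--     result = []
--     for i in range(3 ** n):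
--         row = []
--         e = 3 ** n
--         for c in cell:
--             e //= 3
--             row.append(c + (i // e) % 3 - 1)
--         result.append(tuple(row))
--     result.remove(cell)
--     return result
-- ===== Notes on version B (the rewrite author's own statement) =====
-- stated objective: alternative
-- what changed: Replaces the incrementally rebuilt cartesian product of per-coordinate (x-1,x,x+1) triples by one flat loop over range(3**n) that decodes each index in base 3 into per-coordinate offsets, keeping the final result.remove(cell).
import Mathlib
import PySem

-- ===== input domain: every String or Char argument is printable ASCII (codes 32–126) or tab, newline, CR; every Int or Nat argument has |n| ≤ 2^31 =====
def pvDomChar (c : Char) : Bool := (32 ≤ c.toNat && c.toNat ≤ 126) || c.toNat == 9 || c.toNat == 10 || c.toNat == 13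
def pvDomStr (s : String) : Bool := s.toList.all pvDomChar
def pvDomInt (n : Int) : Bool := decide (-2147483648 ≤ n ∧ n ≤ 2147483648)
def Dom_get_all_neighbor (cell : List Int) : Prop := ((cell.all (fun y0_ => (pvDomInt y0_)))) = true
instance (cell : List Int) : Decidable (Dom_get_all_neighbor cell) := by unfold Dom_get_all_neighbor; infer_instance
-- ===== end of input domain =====

-- B replaces A's incrementally grown cartesian product by a single flat loop over range(3^n)
-- that decodes each index in base 3 into per-coordinate offsets (objective: alternative algorithm).

-- ===== PORT A =====
-- cartesian_product = [(x + [y]) for x in cartesian_product for y in pool], folded over diag_coord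
def get_all_neighbor (cell : List Int) : List (List Int) :=
  let diag_coord : List (Int × Int × Int) := cell.map (fun x => (x - 1, x, x + 1))
  let cartesian_product : List (List Int) :=
    diag_coord.foldl
      (fun acc pool => acc.flatMap (fun x => [pool.1, pool.2.1, pool.2.2].map (fun y => x ++ [y])))
      [[]]
  -- result.append(tuple(prod)): under the type convention tuple(prod) is the same List Int
  let result : List (List Int) := cartesian_product.map (fun prod => prod)
  -- result.remove(cell); the center cell is always present, so the ValueError branch is unreachable
  match PySem.List.remove? result cell with
  | some r => r
  | none => []

-- ===== PORT B =====
-- inner loop: e //= 3; row.append(c + (i // e) % 3 - 1), iterated over cell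
def pvRowOf (cs : List Int) (i e : Int) : List Int :=
  match cs with
  | [] => []
  | c :: cs' =>
    let e' := PySem.Int.floordiv e 3
    (c + PySem.Int.mod (PySem.Int.floordiv i e') 3 - 1) :: pvRowOf cs' i e'

def get_all_neighbor_alt (cell : List Int) : List (List Int) :=
  let n := cell.length
  let result : List (List Int) :=
    (PySem.List.pyRange 0 ((3 : Int) ^ n) 1).map (fun i => pvRowOf cell i ((3 : Int) ^ n))
  match PySem.List.remove? result cell with
  | some r => r
  | none => []

-- ===== PRECONDITION & SPEC =====
def Spec_get_all_neighbor (cell : List Int) (out : List (List Int)) : Prop := out = get_all_neighbor_alt cell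
instance (cell : List Int) (out : List (List Int)) : Decidable (Spec_get_all_neighbor cell out) := by unfold Spec_get_all_neighbor; infer_instance

-- ===== CLAIM (what is proved, stated in full; the proofs are below) =====
def Claim_equal_get_all_neighbor : Prop := ∀ (cell : List Int), Dom_get_all_neighbor cell → Spec_get_all_neighbor cell (get_all_neighbor cell)

-- ===== LEMMAS AND PROOFS =====

-- right-recursive cartesian product of the triples
def pvRcart : List (Int × Int × Int) → List (List Int)
  | [] => [[]]
  | p :: ps => [p.1, p.2.1, p.2.2].flatMap (fun y => (pvRcart ps).map (fun z => y :: z))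

theorem pv_foldl_cart (ps : List (Int × Int × Int)) (acc : List (List Int)) :
    ps.foldl
      (fun acc pool => acc.flatMap (fun x => [pool.1, pool.2.1, pool.2.2].map (fun y => x ++ [y])))
      acc
    = acc.flatMap (fun x => (pvRcart ps).map (fun z => x ++ z)) := by
  induction ps generalizing acc with
  | nil => simp [pvRcart]
  | cons p ps ih =>
    simp only [List.foldl_cons, ih, pvRcart]
    rw [List.flatMap_assoc]
    congr 1
    funext x
    simp [Function.comp_def]

-- floordiv of the cast power by 3
theorem pv_hdiv (l : Nat) :
    PySem.Int.floordiv ((3 ^ (l + 1) : Nat) : Int) 3 = ((3 ^ l : Nat) : Int) := by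
  have h := PySem.Int.floordiv_natCast (3 ^ (l + 1)) 3
  have : (3 : Int) = ((3 : Nat) : Int) := by norm_num
  rw [this, h]
  congr 1
  rw [pow_succ]
  omega

-- only i mod 3^|cs| matters to pvRowOf
theorem pv_rowOf_mod (cs : List Int) (q j : Nat) :
    pvRowOf cs ((q * 3 ^ cs.length + j : Nat) : Int) ((3 ^ cs.length : Nat) : Int)
      = pvRowOf cs (j : Int) ((3 ^ cs.length : Nat) : Int) := by
  induction cs generalizing q with
  | nil => rfl
  | cons c cs ih =>
    simp only [pvRowOf, List.length_cons, pv_hdiv]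
    have h1 : (q * 3 ^ (cs.length + 1) + j : Nat) = (q * 3) * 3 ^ cs.length + j := by ring
    congr 1
    · -- heads equal
      rw [h1]
      have h3 : (3 : Int) = ((3 : Nat) : Int) := by norm_num
      rw [h3, PySem.Int.floordiv_natCast, PySem.Int.floordiv_natCast,
        PySem.Int.mod_natCast, PySem.Int.mod_natCast]
      have hm : 0 < 3 ^ cs.length := by positivity
      congr 2
      have h2 : q * 3 * 3 ^ cs.length + j = 3 ^ cs.length * (q * 3) + j := by ring
      rw [h2, Nat.mul_add_div hm]
      omega
    · rw [h1]
      exact ih (q * 3)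

-- the decoded rows over range(3^n) are exactly the right cartesian product
theorem pv_rcart_eq (cs : List Int) :
    pvRcart (cs.map (fun x => (x - 1, x, x + 1)))
      = (List.range (3 ^ cs.length)).map
          (fun j => pvRowOf cs ((j : Nat) : Int) ((3 ^ cs.length : Nat) : Int)) := by
  induction cs with
  | nil => simp [pvRcart, pvRowOf]
  | cons c cs ih =>
    have hm : 0 < 3 ^ cs.length := by positivity
    have fdef : ∀ j : Nat,
        pvRowOf (c :: cs) ((j : Nat) : Int) ((3 ^ (cs.length + 1) : Nat) : Int)
          = (c + PySem.Int.mod (PySem.Int.floordiv (j : Int) ((3 ^ cs.length : Nat) : Int)) 3 - 1)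
              :: pvRowOf cs ((j : Nat) : Int) ((3 ^ cs.length : Nat) : Int) := by
      intro j
      simp only [pvRowOf, pv_hdiv]
    have seg : ∀ d : Nat, d < 3 →
        (List.range (3 ^ cs.length)).map
            (fun j => pvRowOf (c :: cs) ((d * 3 ^ cs.length + j : Nat) : Int)
              ((3 ^ (cs.length + 1) : Nat) : Int))
          = ((List.range (3 ^ cs.length)).map
              (fun j => pvRowOf cs ((j : Nat) : Int) ((3 ^ cs.length : Nat) : Int))).map
              (fun z => (c + (d : Int) - 1) :: z) := by
      intro d hd
      rw [List.map_map]
      apply List.map_congr_left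
      intro j hj
      rw [List.mem_range] at hj
      rw [fdef (d * 3 ^ cs.length + j)]
      simp only [Function.comp]
      congr 1
      · have h3 : (3 : Int) = ((3 : Nat) : Int) := by norm_num
        rw [h3, PySem.Int.floordiv_natCast, PySem.Int.mod_natCast]
        have hq : (d * 3 ^ cs.length + j) / 3 ^ cs.length = d := by
          have h2 : d * 3 ^ cs.length + j = 3 ^ cs.length * d + j := by ring
          rw [h2, Nat.mul_add_div hm, Nat.div_eq_of_lt hj]
          omega
        rw [hq, Nat.mod_eq_of_lt hd]
      · exact pv_rowOf_mod cs d j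
    have hr : List.range (3 ^ (cs.length + 1))
        = (List.range (3 ^ cs.length)
            ++ (List.range (3 ^ cs.length)).map (fun x => 3 ^ cs.length + x))
            ++ (List.range (3 ^ cs.length)).map (fun x => 3 ^ cs.length + 3 ^ cs.length + x) := by
      rw [show (3 : Nat) ^ (cs.length + 1) = (3 ^ cs.length + 3 ^ cs.length) + 3 ^ cs.length by
        rw [pow_succ]; ring]
      rw [List.range_add, List.range_add]
    simp only [List.map_cons, pvRcart, List.flatMap_cons, List.flatMap_nil, List.append_nil, ih]
    simp only [List.length_cons, hr, List.map_append, List.map_map]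
    have s0 : (List.range (3 ^ cs.length)).map
          (fun j => pvRowOf (c :: cs) ((j : Nat) : Int) ((3 ^ (cs.length + 1) : Nat) : Int))
        = ((List.range (3 ^ cs.length)).map
            (fun j => pvRowOf cs ((j : Nat) : Int) ((3 ^ cs.length : Nat) : Int))).map
            (fun z => (c - 1) :: z) := by
      have := seg 0 (by norm_num)
      simp only [Nat.zero_mul, Nat.zero_add, Nat.cast_zero] at this
      rw [this]
      congr 1
      funext z
      norm_num
    have s1 : (List.range (3 ^ cs.length)).map
          ((fun j => pvRowOf (c :: cs) ((j : Nat) : Int) ((3 ^ (cs.length + 1) : Nat) : Int))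
            ∘ fun x => 3 ^ cs.length + x)
        = ((List.range (3 ^ cs.length)).map
            (fun j => pvRowOf cs ((j : Nat) : Int) ((3 ^ cs.length : Nat) : Int))).map
            (fun z => c :: z) := by
      have h := seg 1 (by norm_num)
      simp only [Nat.one_mul, Nat.cast_one] at h
      rw [show ((fun j => pvRowOf (c :: cs) ((j : Nat) : Int) ((3 ^ (cs.length + 1) : Nat) : Int))
            ∘ fun x => 3 ^ cs.length + x)
          = (fun j => pvRowOf (c :: cs) ((3 ^ cs.length + j : Nat) : Int)
              ((3 ^ (cs.length + 1) : Nat) : Int)) from rfl]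
      rw [h]
      congr 1
      funext z
      norm_num
    have s2 : (List.range (3 ^ cs.length)).map
          ((fun j => pvRowOf (c :: cs) ((j : Nat) : Int) ((3 ^ (cs.length + 1) : Nat) : Int))
            ∘ fun x => 3 ^ cs.length + 3 ^ cs.length + x)
        = ((List.range (3 ^ cs.length)).map
            (fun j => pvRowOf cs ((j : Nat) : Int) ((3 ^ cs.length : Nat) : Int))).map
            (fun z => (c + 1) :: z) := by
      have h := seg 2 (by norm_num)
      rw [show ((fun j => pvRowOf (c :: cs) ((j : Nat) : Int) ((3 ^ (cs.length + 1) : Nat) : Int))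
            ∘ fun x => 3 ^ cs.length + 3 ^ cs.length + x)
          = (fun j => pvRowOf (c :: cs) ((2 * 3 ^ cs.length + j : Nat) : Int)
              ((3 ^ (cs.length + 1) : Nat) : Int)) from by
        funext j
        have : 3 ^ cs.length + 3 ^ cs.length + j = 2 * 3 ^ cs.length + j := by ring
        simp [Function.comp, this]]
      rw [h]
      congr 1
      funext z
      ring_nf
    rw [s0, s1, s2]
    simp [List.map_map, List.append_assoc]

-- the two pre-remove lists coincide
theorem pv_lists_eq (cell : List Int) :
    (cell.map (fun x => (x - 1, x, x + 1))).foldl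
        (fun acc pool => acc.flatMap (fun x => [pool.1, pool.2.1, pool.2.2].map (fun y => x ++ [y])))
        [[]]
      = (PySem.List.pyRange 0 ((3 : Int) ^ cell.length) 1).map
          (fun i => pvRowOf cell i ((3 : Int) ^ cell.length)) := by
  rw [pv_foldl_cart]
  have hcast : ((3 : Int) ^ cell.length) = ((3 ^ cell.length : Nat) : Int) := by push_cast; ring
  rw [hcast, PySem.List.pyRange_zero_natCast, List.map_map]
  simp only [List.flatMap_cons, List.flatMap_nil, List.append_nil, List.nil_append]
  rw [pv_rcart_eq cell]
  simp [Function.comp]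

-- ===== VERDICT (by name: the statement is the Claim_ definition above) =====
theorem get_all_neighbor_spec : Claim_equal_get_all_neighbor := by
  intro cell _
  unfold Spec_get_all_neighbor get_all_neighbor get_all_neighbor_alt
  simp only [List.map_id']
  rw [pv_lists_eq cell]
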